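-- pv_equiv track=rewrite | github.com/waseem087/-Grid-Based-Search-Algorithms-Visualization | Algo.py | _build_2d_array
-- ===== SOURCE A (Python) =====
-- def _build_2d_array(rows, cols, init_value):
--     """
--     Build 2D array manually without list multiplication
--
--     """
--     result = []
--     for r in range(rows):
--         row = []
--         for c in range(cols):
--             row = row + [init_value]  # concatenation (no append)
--         result = result + [row]
--     return result
-- ===== SOURCE B (Python) =====
-- def _build_2d_array(rows, cols, init_value):
--     """Allocate one flat rows*cols buffer, then cut it into row slices.
--     Negative dimensions mean zero rows/columns, so clamp them up front."""
--     rows = max(rows, 0)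
--     cols = max(cols, 0)
--     flat = [init_value] * (rows * cols)
--     return [flat[r * cols:(r + 1) * cols] for r in range(rows)]
-- ===== Notes on version B (the rewrite author's own statement) =====
-- stated objective: faster
-- what changed: A fills each cell via repeated list concatenation inside nested loops; B allocates one flat rows*cols buffer with list repetition and cuts it into row slices, with no per-cell loop.
import Mathlib
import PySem

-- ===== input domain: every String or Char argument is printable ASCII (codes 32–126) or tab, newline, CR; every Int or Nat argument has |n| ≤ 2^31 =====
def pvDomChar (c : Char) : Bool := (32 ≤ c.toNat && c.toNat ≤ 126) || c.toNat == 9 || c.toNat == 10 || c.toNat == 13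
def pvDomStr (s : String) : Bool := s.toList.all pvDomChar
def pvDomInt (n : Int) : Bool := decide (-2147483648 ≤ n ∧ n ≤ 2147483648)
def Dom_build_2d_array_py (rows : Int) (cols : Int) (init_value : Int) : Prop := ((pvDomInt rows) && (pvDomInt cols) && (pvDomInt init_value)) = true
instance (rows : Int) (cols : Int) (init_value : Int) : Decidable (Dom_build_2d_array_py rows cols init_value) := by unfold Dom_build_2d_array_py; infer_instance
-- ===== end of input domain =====

-- B replaces A's nested per-cell concatenation loops by allocating one flat rows*cols buffer
-- and cutting it into row slices (a different algorithm; return values proved equal).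

-- ===== PORT A =====
def build_2d_array_py (rows : Int) (cols : Int) (init_value : Int) : List (List Int) :=
  (PySem.List.pyRange 0 rows 1).foldl
    (fun result _ =>
      let row := (PySem.List.pyRange 0 cols 1).foldl (fun row _ => row ++ [init_value]) []
      result ++ [row])
    []

-- ===== PORT B =====
def build_2d_array_py_alt (rows : Int) (cols : Int) (init_value : Int) : List (List Int) :=
  let rows' := max rows 0
  let cols' := max cols 0
  -- [init_value] * n: Python list repetition is empty for a count ≤ 0, exactly toNat's clamp
  let flat := List.replicate (rows' * cols').toNat init_value
  (PySem.List.pyRange 0 rows' 1).map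
    (fun r => PySem.List.slice flat (some (r * cols')) (some ((r + 1) * cols')))

-- ===== PRECONDITION & SPEC =====
def Spec_build_2d_array_py (rows : Int) (cols : Int) (init_value : Int) (out : List (List Int)) : Prop := out = build_2d_array_py_alt rows cols init_value
instance (rows : Int) (cols : Int) (init_value : Int) (out : List (List Int)) : Decidable (Spec_build_2d_array_py rows cols init_value out) := by unfold Spec_build_2d_array_py; infer_instance

-- ===== CLAIM (what is proved, stated in full; the proofs are below) =====
def Claim_equal_build_2d_array_py : Prop := ∀ (rows : Int) (cols : Int) (init_value : Int), Dom_build_2d_array_py rows cols init_value → Spec_build_2d_array_py rows cols init_value (build_2d_array_py rows cols init_value)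

-- ===== LEMMAS AND PROOFS =====

-- Each row slice of the flat replicate buffer is exactly A's row of init_value's.
theorem row_slice_eq (rows cols v r : Int) (h0 : 0 ≤ r) (hr : r < rows) :
    PySem.List.slice (List.replicate (rows * cols).toNat v) (some (r * cols)) (some ((r + 1) * cols))
      = List.replicate cols.toNat v := by
  by_cases hc : cols ≤ 0
  · have hflat : (rows * cols).toNat = 0 := by
      have : rows * cols ≤ 0 := mul_nonpos_of_nonneg_of_nonpos (by omega) hc
      omega
    have hcn : cols.toNat = 0 := by omega
    rw [hflat, hcn]
    simp [PySem.List.slice]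
  · rw [not_le] at hc
    have ha : 0 ≤ r * cols := mul_nonneg h0 (le_of_lt hc)
    have hb : 0 ≤ (r + 1) * cols := mul_nonneg (by omega) (le_of_lt hc)
    rw [PySem.List.slice_toNat _ ha hb, List.drop_replicate, List.take_replicate]
    have hab : (r + 1) * cols = r * cols + cols := by ring
    have hle : (r + 1) * cols ≤ rows * cols :=
      mul_le_mul_of_nonneg_right (by omega) (le_of_lt hc)
    congr 1
    omega

-- ===== VERDICT (by name: the statement is the Claim_ definition above) =====
theorem build_2d_array_py_spec : Claim_equal_build_2d_array_py := by
  intro rows cols v _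
  unfold Spec_build_2d_array_py build_2d_array_py build_2d_array_py_alt
  rw [PySem.List.foldl_append_singleton_eq_map]
  simp only [List.nil_append]
  have hrange : PySem.List.pyRange 0 rows 1 = PySem.List.pyRange 0 (max rows 0) 1 := by
    by_cases h : rows ≤ 0
    · rw [PySem.List.pyRange_one_eq_nil h, PySem.List.pyRange_one_eq_nil (by omega)]
    · rw [max_eq_left (by omega : (0:Int) ≤ rows)]
  rw [hrange]
  apply List.map_congr_left
  intro r hr
  rw [PySem.List.mem_pyRange_one] at hr
  rw [PySem.List.foldl_append_singleton_eq_map, List.nil_append,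
      row_slice_eq (max rows 0) (max cols 0) v r hr.1 hr.2, List.map_const',
      PySem.List.length_pyRange_one]
  congr 1
  omega
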